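-- pv_equiv track=rewrite | github.com/Jdawg0309/OfflineAppGenerator | backend/code_parser.py | extract_likely_code
-- ===== SOURCE A (Python) =====
-- def extract_likely_code(text: str) -> str:
--     """
--     Naive extraction: returns the longest 'from ...' to 'app.run' block as a guess.
--     """
--     lines = text.splitlines()
--     code_lines = []
--     record = False
--     for line in lines:
--         if "from flask" in line:
--             record = True
--         if record:
--             code_lines.append(line)
--         if "app.run" in line:
--             break
--     return "\n".join(code_lines).strip()
-- ===== SOURCE B (Python) =====
-- def extract_likely_code(text: str) -> str:
--     lines = text.splitlines()
--     flask_idx = next((i for i, l in enumerate(lines) if "from flask" in l), None)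
--     if flask_idx is None:
--         return ""
--     run_idx = next((i for i, l in enumerate(lines) if "app.run" in l), None)
--     if run_idx is not None and run_idx < flask_idx:
--         return ""
--     end = run_idx if run_idx is not None else len(lines) - 1
--     return "\n".join(lines[flask_idx:end + 1]).strip()
-- ===== Notes on version B (the rewrite author's own statement) =====
-- stated objective: simpler
-- what changed: Replaces the record-flag/break accumulation loop with two index searches (first 'from flask' line, first 'app.run' line) and a single slice-and-join, guarding the case where app.run precedes the flask import.
import Mathlib
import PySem

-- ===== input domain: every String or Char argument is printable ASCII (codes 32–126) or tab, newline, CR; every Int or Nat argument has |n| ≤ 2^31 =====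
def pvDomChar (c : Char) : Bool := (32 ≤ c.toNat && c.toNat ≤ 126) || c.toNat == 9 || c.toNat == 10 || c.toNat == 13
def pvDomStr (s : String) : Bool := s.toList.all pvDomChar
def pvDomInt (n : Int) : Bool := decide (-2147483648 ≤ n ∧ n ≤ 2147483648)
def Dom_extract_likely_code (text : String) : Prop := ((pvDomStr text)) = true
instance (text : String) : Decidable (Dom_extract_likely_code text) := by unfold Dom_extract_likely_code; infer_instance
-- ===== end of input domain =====

-- B replaces A's record-flag/break loop by locating the first 'from flask' and first 'app.run'
-- lines and returning one slice (objective: simpler); same return value on every input.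

-- ===== PORT A =====
-- the for-loop with the `record` flag and the `break` on "app.run"
def pvLoopA : List String → List String → Bool → List String
  | [], acc, _ => acc
  | line :: rest, acc, record =>
    let record := record || PySem.Str.isIn "from flask" line
    let acc := if record then acc ++ [line] else acc
    if PySem.Str.isIn "app.run" line then acc else pvLoopA rest acc record

def extract_likely_code (text : String) : String :=
  PySem.Str.strip (PySem.Str.join "\n" (pvLoopA (PySem.Str.splitlines text) [] false))

-- ===== PORT B =====
def extract_likely_code_alt (text : String) : String :=
  let lines := PySem.Str.splitlines text
  match lines.findIdx? (fun l => PySem.Str.isIn "from flask" l) with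
  | none => ""
  | some fi =>
    match lines.findIdx? (fun l => PySem.Str.isIn "app.run" l) with
    | some ri =>
        if ri < fi then ""
        else PySem.Str.strip (PySem.Str.join "\n" ((lines.take (ri + 1)).drop fi))
    | none => PySem.Str.strip (PySem.Str.join "\n" (lines.drop fi))

-- ===== PRECONDITION & SPEC =====
def Spec_extract_likely_code (text : String) (out : String) : Prop := out = extract_likely_code_alt text
instance (text : String) (out : String) : Decidable (Spec_extract_likely_code text out) := by unfold Spec_extract_likely_code; infer_instance

-- ===== CLAIM (what is proved, stated in full; the proofs are below) =====
def Claim_equal_extract_likely_code : Prop := ∀ (text : String), Dom_extract_likely_code text → Spec_extract_likely_code text (extract_likely_code text)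

-- ===== LEMMAS AND PROOFS =====

-- abbreviations for the two predicates (proof-side only)
def pvF (l : String) : Bool := PySem.Str.isIn "from flask" l
def pvR (l : String) : Bool := PySem.Str.isIn "app.run" l

-- lines up to and including the first "app.run" line
def pvUpTo (l : List String) : List String :=
  match l.findIdx? pvR with
  | some ri => l.take (ri + 1)
  | none => l

-- the list B slices out
def pvB (l : List String) : List String :=
  match l.findIdx? pvF with
  | none => []
  | some fi =>
    match l.findIdx? pvR with
    | some ri => if ri < fi then [] else (l.take (ri + 1)).drop fi
    | none => l.drop fi

theorem pvUpTo_cons (a : String) (rest : List String) :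
    pvUpTo (a :: rest) = if pvR a then [a] else a :: pvUpTo rest := by
  unfold pvUpTo
  rw [List.findIdx?_cons]
  cases h : pvR a
  · simp only [h, Bool.false_eq_true, if_false]
    cases hf : rest.findIdx? pvR <;> simp [hf]
  · simp [h]

theorem pvLoopA_acc (l : List String) : ∀ (acc : List String) (r : Bool),
    pvLoopA l acc r = acc ++ pvLoopA l [] r := by
  induction l with
  | nil => intro acc r; simp [pvLoopA]
  | cons line rest ih =>
    intro acc r
    simp only [pvLoopA]
    cases hrun : PySem.Str.isIn "app.run" line
    · simp only [hrun, Bool.false_eq_true, if_false]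
      cases hr : (r || PySem.Str.isIn "from flask" line)
      · simp only [hr, Bool.false_eq_true, if_false]
        rw [ih acc]
      · simp only [hr, if_true]
        rw [List.nil_append, ih (acc ++ [line]), ih [line]]
        simp only [List.append_assoc, List.singleton_append, List.nil_append]
    · simp only [hrun, if_true]
      cases hr : (r || PySem.Str.isIn "from flask" line)
      · simp only [Bool.false_eq_true, if_false, List.append_nil]
      · simp only [if_true, List.nil_append]

theorem pvLoopA_true (l : List String) : pvLoopA l [] true = pvUpTo l := by
  induction l with
  | nil => simp [pvLoopA, pvUpTo]
  | cons line rest ih =>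
    rw [pvUpTo_cons]
    simp only [pvLoopA, Bool.true_or, if_true, List.nil_append]
    cases hrun : PySem.Str.isIn "app.run" line
    · have h2 : pvR line = false := hrun
      simp only [h2, Bool.false_eq_true, if_false]
      rw [pvLoopA_acc, ih]
      rfl
    · have h2 : pvR line = true := hrun
      simp only [h2, if_true]

theorem pvLoopA_false (l : List String) : pvLoopA l [] false = pvB l := by
  induction l with
  | nil => simp [pvLoopA, pvB]
  | cons line rest ih =>
    simp only [pvLoopA, Bool.false_or, List.nil_append]
    unfold pvB
    rw [List.findIdx?_cons, List.findIdx?_cons]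
    cases hf : PySem.Str.isIn "from flask" line <;>
      cases hrun : PySem.Str.isIn "app.run" line
    · -- no marker on this line: recurse, indices shift by one
      have hf2 : pvF line = false := hf
      have hr2 : pvR line = false := hrun
      simp only [hf2, hr2, Bool.false_eq_true, if_false]
      rw [ih]
      unfold pvB
      cases hfi : rest.findIdx? pvF with
      | none => simp [hfi]
      | some fi =>
        cases hri : rest.findIdx? pvR with
        | none => simp only [hfi, hri, Option.map_some, Option.map_none,
            List.drop_succ_cons]
        | some ri =>
          simp only [hfi, hri, Option.map_some]
          by_cases hlt : ri < fi
          · have : ri + 1 < fi + 1 := by omega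
            simp only [hlt, this, if_true]
          · have : ¬ ri + 1 < fi + 1 := by omega
            simp only [hlt, this, Bool.false_eq_true, if_false,
              List.take_succ_cons, List.drop_succ_cons]
    · -- app.run before any flask line: A breaks with [], B returns []
      have hf2 : pvF line = false := hf
      have hr2 : pvR line = true := hrun
      simp only [hf2, hr2, Bool.false_eq_true, if_false, if_true]
      cases hfi : rest.findIdx? pvF <;> simp [hfi]
    · -- flask line found, no app.run here: tail is pvUpTo rest
      have hf2 : pvF line = true := hf
      have hr2 : pvR line = false := hrun
      simp only [hf2, hr2, Bool.false_eq_true, if_false, if_true]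
      rw [pvLoopA_acc, pvLoopA_true]
      unfold pvUpTo
      cases hri : rest.findIdx? pvR with
      | none => simp [hri]
      | some ri => simp [hri, List.take_succ_cons]
    · -- both markers on this single line
      have hf2 : pvF line = true := hf
      have hr2 : pvR line = true := hrun
      simp only [hf2, hr2, if_true]
      rfl

theorem pv_empty_join : PySem.Str.strip (PySem.Str.join "\n" []) = "" := by decide

-- ===== VERDICT (by name: the statement is the Claim_ definition above) =====
theorem extract_likely_code_spec : Claim_equal_extract_likely_code := by
  intro text _
  unfold Spec_extract_likely_code extract_likely_code extract_likely_code_alt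
  rw [pvLoopA_false]
  unfold pvB
  rw [show (fun l => PySem.Str.isIn "from flask" l) = pvF from rfl,
      show (fun l => PySem.Str.isIn "app.run" l) = pvR from rfl]
  cases hfi : (PySem.Str.splitlines text).findIdx? pvF with
  | none => simp [hfi, pv_empty_join]
  | some fi =>
    cases hri : (PySem.Str.splitlines text).findIdx? pvR with
    | none => simp [hfi, hri]
    | some ri =>
      by_cases hlt : ri < fi
      · simp [hfi, hri, hlt, pv_empty_join]
      · simp [hfi, hri, hlt]
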